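-- pv_equiv track=rewrite | github.com/CAMeL-Lab/arabic-gec | data/utils/jsonify_data.py | collate_ged_tags
-- ===== SOURCE A (Python) =====
-- def collate_ged_tags(ged_tags):
--     src_ged = []
--     all_src_ged = []
--     for i, line in enumerate(ged_tags):
--         line = line.strip()
--         if line:
--             src_token, tag = line.split('\t')
--             src_ged.append({'src_token': src_token,
--                             'tag': tag}
--                             )
--         else:
--             all_src_ged.append(src_ged)
--             src_ged = []
--
--     return all_src_ged
-- ===== SOURCE B (Python) =====
-- def _parse(line):
--     src_token, tag = line.strip().split('\t')
--     return {'src_token': src_token, 'tag': tag}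
--
--
-- def collate_ged_tags(ged_tags):
--     blanks = [i for i, line in enumerate(ged_tags) if not line.strip()]
--     all_src_ged = []
--     start = 0
--     for b in blanks:
--         all_src_ged.append([_parse(line) for line in ged_tags[start:b]])
--         start = b + 1
--     return all_src_ged
-- ===== Notes on version B (the rewrite author's own statement) =====
-- stated objective: alternative
-- what changed: Instead of one stateful pass with a running-segment accumulator and flush-on-blank, B first computes the list of blank-line indices and then builds each segment by slicing the input between consecutive delimiters with a start cursor.
import Mathlib
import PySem

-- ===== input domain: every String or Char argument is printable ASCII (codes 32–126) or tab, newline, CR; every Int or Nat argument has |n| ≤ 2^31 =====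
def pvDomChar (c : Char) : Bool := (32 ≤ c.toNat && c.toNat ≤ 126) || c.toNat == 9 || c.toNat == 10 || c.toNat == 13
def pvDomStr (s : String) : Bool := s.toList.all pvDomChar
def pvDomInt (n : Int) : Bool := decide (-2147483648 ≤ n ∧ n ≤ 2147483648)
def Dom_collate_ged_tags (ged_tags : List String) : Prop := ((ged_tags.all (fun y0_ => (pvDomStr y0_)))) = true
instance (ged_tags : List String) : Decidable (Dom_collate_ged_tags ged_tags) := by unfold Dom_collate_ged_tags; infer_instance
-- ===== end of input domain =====

-- B replaces A's stateful flush-on-blank accumulator by a pass that collects the blank-line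
-- indices and then slices the input between consecutive delimiters (alternative decomposition,
-- same cost).

-- ===== PORT A =====
def collate_ged_tags (ged_tags : List String) : List (List (List (String × String))) :=
  (ged_tags.foldl
    (fun (st : List (List (String × String)) × List (List (List (String × String)))) line =>
      let line := PySem.Str.strip line
      if line ≠ "" then
        match PySem.Str.split? line "\t" with
        | some [src_token, tag] => (st.1 ++ [[("src_token", src_token), ("tag", tag)]], st.2)
        | _ => st  -- Python raises ValueError here (tuple unpacking); excluded by Pre_
      else ([], st.2 ++ [st.1]))
    ([], [])).2

-- ===== PORT B =====
def pvParse_alt (line : String) : List (String × String) :=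
  -- split('\t') has a nonempty separator, so split? is always `some`: the [] default is never taken;
  -- the 2-tuple unpack is the length test plus the two indexings
  let parts := (PySem.Str.split? (PySem.Str.strip line) "\t").getD []
  if h : parts.length = 2 then
    [("src_token", parts[0]'(by omega)), ("tag", parts[1]'(by omega))]
  else []  -- Python raises ValueError here (tuple unpacking); excluded by Pre_

def collate_ged_tags_alt (ged_tags : List String) : List (List (List (String × String))) :=
  let blanks := (PySem.List.enumerate ged_tags 0).filterMap
    (fun p => if PySem.Str.strip p.2 = "" then some p.1 else none)
  (blanks.foldl
    (fun (st : Int × List (List (List (String × String)))) b =>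
      (b + 1, st.2 ++ [(PySem.List.slice ged_tags (some st.1) (some b)).map pvParse_alt]))
    ((0 : Int), [])).2

-- ===== PRECONDITION & SPEC =====
-- Pre_ excludes exactly the inputs on which A raises ValueError: a non-blank line whose
-- stripped form does not split on '\t' into exactly two fields.
def Pre_collate_ged_tags (ged_tags : List String) : Prop :=
  ∀ l ∈ ged_tags, PySem.Str.strip l ≠ "" →
    ((PySem.Str.split? (PySem.Str.strip l) "\t").getD []).length = 2

instance (ged_tags : List String) : Decidable (Pre_collate_ged_tags ged_tags) := by
  unfold Pre_collate_ged_tags; infer_instance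

def pvWitness_collate_ged_tags : List String := ["a\tb", "", "c d\te", ""]

def Spec_collate_ged_tags (ged_tags : List String) (out : List (List (List (String × String)))) : Prop := out = collate_ged_tags_alt ged_tags
instance (ged_tags : List String) (out : List (List (List (String × String)))) : Decidable (Spec_collate_ged_tags ged_tags out) := by unfold Spec_collate_ged_tags; infer_instance

-- ===== CLAIM (what is proved, stated in full; the proofs are below) =====
def Claim_equal_collate_ged_tags : Prop := ∀ (ged_tags : List String), Dom_collate_ged_tags ged_tags → Pre_collate_ged_tags ged_tags → Spec_collate_ged_tags ged_tags (collate_ged_tags ged_tags)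

-- ===== LEMMAS AND PROOFS =====

-- the blank-delimited groups of xs, `cur` being the group under construction (both ports compute this)
def pvG : List String → List (List (String × String)) → List (List (List (String × String)))
  | [], _ => []
  | x :: xs, cur =>
    if PySem.Str.strip x = "" then cur :: pvG xs []
    else pvG xs (cur ++ [pvParse_alt x])

-- A's loop body, named so the fold lemma can speak about it (the port's lambda, definitionally)
def pvStepA (st : List (List (String × String)) × List (List (List (String × String)))) (line : String) :
    List (List (String × String)) × List (List (List (String × String))) :=
  let line := PySem.Str.strip line
  if line ≠ "" then
    match PySem.Str.split? line "\t" with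
    | some [src_token, tag] => (st.1 ++ [[("src_token", src_token), ("tag", tag)]], st.2)
    | _ => st
  else ([], st.2 ++ [st.1])

lemma pvStepA_blank (st : List (List (String × String)) × List (List (List (String × String))))
    (x : String) (hb : PySem.Str.strip x = "") :
    pvStepA st x = ([], st.2 ++ [st.1]) := by simp [pvStepA, hb]

lemma pvStepA_tok (st : List (List (String × String)) × List (List (List (String × String))))
    (x a b : String) (hb : PySem.Str.strip x ≠ "")
    (h : PySem.Str.split? (PySem.Str.strip x) "\t" = some [a, b]) :
    pvStepA st x = (st.1 ++ [[("src_token", a), ("tag", b)]], st.2) := by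
  simp [pvStepA, hb, h]

lemma pvA_fold (xs : List String) :
    ∀ (cur : List (List (String × String))) (acc : List (List (List (String × String)))),
    (∀ l ∈ xs, PySem.Str.strip l ≠ "" →
      ((PySem.Str.split? (PySem.Str.strip l) "\t").getD []).length = 2) →
    (xs.foldl pvStepA (cur, acc)).2 = acc ++ pvG xs cur := by
  induction xs with
  | nil => intro cur acc _; simp [pvG]
  | cons x xs ih =>
    intro cur acc hpre
    rw [List.foldl_cons]
    by_cases hb : PySem.Str.strip x = ""
    · rw [pvStepA_blank _ _ hb]
      rw [ih [] (acc ++ [cur]) (fun l hl => hpre l (List.mem_cons_of_mem _ hl))]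
      simp [pvG, hb]
    · have h2 := hpre x (List.mem_cons_self) hb
      rcases h : PySem.Str.split? (PySem.Str.strip x) "\t" with _ | parts
      · rw [h] at h2; simp at h2
      · rw [h] at h2
        match parts, h2 with
        | [a, b], _ =>
          rw [pvStepA_tok _ _ a b hb h]
          rw [ih (cur ++ [[("src_token", a), ("tag", b)]]) acc
              (fun l hl => hpre l (List.mem_cons_of_mem _ hl))]
          simp [pvG, hb, pvParse_alt, h]

-- B's blank-index list starting at offset s, and B's loop body over a fixed full list
def pvBlanksFrom (s : Int) (xs : List String) : List Int :=
  (PySem.List.enumerate xs s).filterMap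
    (fun p => if PySem.Str.strip p.2 = "" then some p.1 else none)

def pvStepB (full : List String) (st : Int × List (List (List (String × String)))) (b : Int) :
    Int × List (List (List (String × String))) :=
  (b + 1, st.2 ++ [(PySem.List.slice full (some st.1) (some b)).map pvParse_alt])

lemma pvBlanksFrom_cons (s : Int) (x : String) (xs : List String) :
    pvBlanksFrom s (x :: xs) =
      (if PySem.Str.strip x = "" then [s] else []) ++ pvBlanksFrom (s + 1) xs := by
  simp only [pvBlanksFrom, PySem.List.enumerate_cons, List.filterMap_cons]
  split_ifs <;> simp_all

lemma pvB_fold (xs : List String) :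
    ∀ (done mid : List String) (acc : List (List (List (String × String)))),
    (∀ l ∈ mid, PySem.Str.strip l ≠ "") →
    ((pvBlanksFrom (((done.length + mid.length : Nat) : Int)) xs).foldl
      (pvStepB (done ++ mid ++ xs))
      (((done.length : Nat) : Int), acc)).2 = acc ++ pvG xs (mid.map pvParse_alt) := by
  induction xs with
  | nil => intro done mid acc _; simp [pvBlanksFrom, pvG]
  | cons x xs ih =>
    intro done mid acc hmid
    rw [pvBlanksFrom_cons]
    by_cases hb : PySem.Str.strip x = ""
    · rw [if_pos hb]
      simp only [List.singleton_append, List.foldl_cons]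
      have hslice : PySem.List.slice (done ++ mid ++ x :: xs)
          (some ((done.length : Nat) : Int)) (some (((done.length + mid.length : Nat) : Int))) = mid := by
        rw [PySem.List.slice_natCast]
        rw [Nat.add_sub_cancel_left]
        rw [show done ++ mid ++ x :: xs = done ++ (mid ++ x :: xs) by simp]
        rw [List.drop_left, List.take_left]
      have hstep : pvStepB (done ++ mid ++ x :: xs) (((done.length : Nat) : Int), acc)
            ((done.length + mid.length : Nat) : Int)
          = (((done.length + mid.length : Nat) : Int) + 1, acc ++ [mid.map pvParse_alt]) := by
        simp only [pvStepB]; rw [hslice]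
      rw [hstep]
      have key := ih (done ++ mid ++ [x]) [] (acc ++ [mid.map pvParse_alt]) (by simp)
      simp only [List.append_nil, List.length_nil, Nat.add_zero, List.length_append,
        List.length_cons] at key ⊢
      push_cast at key ⊢
      rw [show done ++ mid ++ [x] ++ xs = done ++ mid ++ x :: xs by simp] at key
      rw [key]
      simp [pvG, hb]
    · rw [if_neg hb, List.nil_append]
      have e2 : ((done.length + mid.length : Nat) : Int) + 1
          = ((done.length + (mid ++ [x]).length : Nat) : Int) := by simp; omega
      have e3 : done ++ mid ++ x :: xs = done ++ (mid ++ [x]) ++ xs := by simp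
      rw [e2, e3]
      rw [ih done (mid ++ [x]) acc (by
        intro l hl
        rcases List.mem_append.1 hl with h | h
        · exact hmid l h
        · rw [List.mem_singleton.1 h]; exact hb)]
      simp [pvG, hb, pvParse_alt]

-- ===== VERDICT (by name: the statement is the Claim_ definition above) =====
theorem collate_ged_tags_spec : Claim_equal_collate_ged_tags := by
  intro xs _ hpre
  unfold Spec_collate_ged_tags
  have hA : collate_ged_tags xs = pvG xs [] := by
    rw [show collate_ged_tags xs = (xs.foldl pvStepA ([], [])).2 from rfl]
    rw [pvA_fold xs [] [] hpre]
    simp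
  have hB : collate_ged_tags_alt xs = pvG xs [] := by
    have key := pvB_fold xs [] [] [] (by simp)
    simpa [pvBlanksFrom, pvStepB, collate_ged_tags_alt] using key
  rw [hA, hB]
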